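-- pv_equiv track=rewrite | github.com/bfilipczyk/coup | ai.py | add_to_deck
-- ===== SOURCE A (Python) =====
-- def add_to_deck(known_cards, player_cards):
--     """Returns list of all possible cards player can have."""
--     deck = []
--     russia = 3
--     protest = 3
--     media = 3
--     police = 3
--     ue = 3
--     for card in known_cards:
--         if card == 'russia':
--             russia -= 1
--         elif card == 'protest':
--             protest -= 1
--         elif card == 'media':
--             media -= 1
--         elif card == 'police':
--             police -= 1
--         elif card == 'ue':
--             ue -= 1
--     for card in player_cards:
--         if card == 'russia':
--             russia -= 1
--         elif card == 'protest':
--             protest -= 1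
--         elif card == 'media':
--             media -= 1
--         elif card == 'police':
--             police -= 1
--         elif card == 'ue':
--             ue -= 1
--     for _ in range(russia):
--         deck.append('russia')
--     for _ in range(protest):
--         deck.append('protest')
--     for _ in range(media):
--         deck.append('media')
--     for _ in range(police):
--         deck.append('police')
--     for _ in range(ue):
--         deck.append('ue')
--     return deck
-- ===== SOURCE B (Python) =====
-- def add_to_deck(known_cards, player_cards):
--     """Returns list of all possible cards player can have."""
--     deck = []
--     for name in ['russia', 'protest', 'media', 'police', 'ue']:
--         deck += [name, name, name]
--     for card in known_cards + player_cards: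
--         if card in deck:
--             deck.remove(card)
--     return deck
-- ===== Notes on version B (the rewrite author's own statement) =====
-- stated objective: alternative
-- what changed: Instead of counting occurrences into five counters and then emitting each card count-many times, B constructs the full 15-card deck up front and deletes the first occurrence of each seen card from it (guarded list.remove), returning what is left.
import Mathlib
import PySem

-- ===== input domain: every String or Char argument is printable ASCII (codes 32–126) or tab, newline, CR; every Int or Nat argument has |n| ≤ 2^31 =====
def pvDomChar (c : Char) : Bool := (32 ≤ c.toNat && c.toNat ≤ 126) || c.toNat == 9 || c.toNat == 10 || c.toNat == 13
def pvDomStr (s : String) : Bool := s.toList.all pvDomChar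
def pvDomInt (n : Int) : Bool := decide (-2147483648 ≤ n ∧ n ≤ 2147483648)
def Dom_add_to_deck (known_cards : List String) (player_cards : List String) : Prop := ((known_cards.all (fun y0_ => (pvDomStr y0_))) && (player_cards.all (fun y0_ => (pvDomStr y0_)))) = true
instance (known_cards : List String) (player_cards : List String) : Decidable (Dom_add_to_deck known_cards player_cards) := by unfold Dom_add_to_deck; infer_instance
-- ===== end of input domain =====

-- B builds the full 15-card deck up front and deletes one copy per seen card (guarded first-occurrence
-- removal), instead of A's counting into five named counters followed by five range-append loops
-- (alternative algorithm; same cost).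

-- ===== PORT A =====
-- the identical body of A's two counting loops
def pvStepA (s : Int × Int × Int × Int × Int) (card : String) : Int × Int × Int × Int × Int :=
  let (r, p, m, po, u) := s
  if card == "russia" then (r - 1, p, m, po, u)
  else if card == "protest" then (r, p - 1, m, po, u)
  else if card == "media" then (r, p, m - 1, po, u)
  else if card == "police" then (r, p, m, po - 1, u)
  else if card == "ue" then (r, p, m, po, u - 1)
  else (r, p, m, po, u)

def add_to_deck (known_cards : List String) (player_cards : List String) : List String :=
  let s1 := known_cards.foldl pvStepA (3, 3, 3, 3, 3)
  let (r, p, m, po, u) := player_cards.foldl pvStepA s1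
  let deck := (PySem.List.pyRange 0 r 1).foldl (fun d _ => d ++ ["russia"]) []
  let deck := (PySem.List.pyRange 0 p 1).foldl (fun d _ => d ++ ["protest"]) deck
  let deck := (PySem.List.pyRange 0 m 1).foldl (fun d _ => d ++ ["media"]) deck
  let deck := (PySem.List.pyRange 0 po 1).foldl (fun d _ => d ++ ["police"]) deck
  let deck := (PySem.List.pyRange 0 u 1).foldl (fun d _ => d ++ ["ue"]) deck
  deck

-- ===== PORT B =====
-- "if card in deck: deck.remove(card)" — guarded removal of the first occurrence
def pvStepB (deck : List String) (card : String) : List String :=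
  if deck.contains card then (PySem.List.remove? deck card).getD deck else deck

def add_to_deck_alt (known_cards : List String) (player_cards : List String) : List String :=
  let deck := ["russia", "protest", "media", "police", "ue"].foldl
    (fun d name => d ++ [name, name, name]) []
  (known_cards ++ player_cards).foldl pvStepB deck

-- ===== PRECONDITION & SPEC =====
def Spec_add_to_deck (known_cards : List String) (player_cards : List String) (out : List String) : Prop := out = add_to_deck_alt known_cards player_cards
instance (known_cards : List String) (player_cards : List String) (out : List String) : Decidable (Spec_add_to_deck known_cards player_cards out) := by unfold Spec_add_to_deck; infer_instance

-- ===== CLAIM (what is proved, stated in full; the proofs are below) =====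
def Claim_equal_add_to_deck : Prop := ∀ (known_cards : List String) (player_cards : List String), Dom_add_to_deck known_cards player_cards → Spec_add_to_deck known_cards player_cards (add_to_deck known_cards player_cards)

-- ===== LEMMAS AND PROOFS =====

-- shape of B's deck throughout the removal fold
def pvDeck5 (a b c d e : Nat) : List String :=
  List.replicate a "russia" ++ List.replicate b "protest" ++ List.replicate c "media" ++
    List.replicate d "police" ++ List.replicate e "ue"

-- A's counting fold computes the start values minus the occurrence counts
theorem pvFoldA_eq (l : List String) (r p m po u : Int) :
    l.foldl pvStepA (r, p, m, po, u) =
      (r - l.count "russia", p - l.count "protest", m - l.count "media",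
       po - l.count "police", u - l.count "ue") := by
  induction l generalizing r p m po u with
  | nil => simp
  | cons x t ih =>
      simp only [List.foldl_cons, pvStepA, List.count_cons]
      split_ifs with h1 h2 h3 h4 h5 <;>
        simp_all [beq_iff_eq] <;> ring_nf

-- A's range-append loop is replicate
theorem pvRangeFold (n : Int) (a : String) (d : List String) :
    (PySem.List.pyRange 0 n 1).foldl (fun d _ => d ++ [a]) d = d ++ List.replicate n.toNat a := by
  have hlen : (PySem.List.pyRange 0 n 1).length = n.toNat := by
    simp only [PySem.List.pyRange]
    split
    · simp_all
    · simp_all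
      omega
  calc (PySem.List.pyRange 0 n 1).foldl (fun d _ => d ++ [a]) d
      = d ++ (PySem.List.pyRange 0 n 1).map (fun _ => a) :=
        PySem.List.foldl_append_singleton_eq_map _ _ _
    _ = d ++ List.replicate n.toNat a := by rw [List.map_const', hlen]

-- if card ≠ x, removal passes over a replicate-x prefix
theorem pvStepB_skip (x : String) (a : Nat) (l : List String) (card : String) (h : card ≠ x) :
    pvStepB (List.replicate a x ++ l) card = List.replicate a x ++ pvStepB l card := by
  unfold pvStepB
  by_cases hc : card ∈ l
  · have hmem : card ∈ List.replicate a x ++ l := List.mem_append.mpr (Or.inr hc)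
    have hnp : card ∉ List.replicate a x := by simp [List.mem_replicate, h]
    rw [if_pos (by simpa using hmem), if_pos (by simpa using hc),
      PySem.List.remove?_eq_some_erase _ _ hmem, PySem.List.remove?_eq_some_erase _ _ hc,
      Option.getD_some, Option.getD_some, List.erase_append_right _ hnp]
  · have hm : card ∉ List.replicate a x ++ l := by
      simp [List.mem_replicate, h, hc]
    rw [if_neg (by simpa using hm), if_neg (by simpa using hc)]

-- removal at the head segment: decrement it (no-op when empty and card absent later)
theorem pvStepB_head (x : String) (b : Nat) (l : List String) (hx : x ∉ l) :
    pvStepB (List.replicate b x ++ l) x = List.replicate (b - 1) x ++ l := by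
  cases b with
  | zero => simp [pvStepB, hx]
  | succ n =>
      rw [List.replicate_succ, List.cons_append]
      simp [pvStepB, PySem.List.remove?_cons_self]

-- a card that is none of the five names is never in the deck
theorem pvStepB_none (deck : List String) (card : String) (h : card ∉ deck) :
    pvStepB deck card = deck := by simp [pvStepB, h]

-- B's removal step decrements exactly the matching component of the deck shape
theorem pvStepB_deck5 (a b c d e : Nat) (card : String) :
    pvStepB (pvDeck5 a b c d e) card =
      pvDeck5 (if card = "russia" then a - 1 else a) (if card = "protest" then b - 1 else b)
        (if card = "media" then c - 1 else c) (if card = "police" then d - 1 else d)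
        (if card = "ue" then e - 1 else e) := by
  simp only [pvDeck5, List.append_assoc]
  by_cases h1 : card = "russia"
  · subst h1
    simp only [String.reduceEq, reduceIte]
    exact pvStepB_head _ _ _ (by simp [List.mem_replicate])
  by_cases h2 : card = "protest"
  · subst h2
    simp only [String.reduceEq, reduceIte]
    rw [pvStepB_skip _ _ _ _ h1]
    rw [pvStepB_head _ _ _ (by simp [List.mem_replicate])]
  by_cases h3 : card = "media"
  · subst h3
    simp only [String.reduceEq, reduceIte]
    rw [pvStepB_skip _ _ _ _ h1, pvStepB_skip _ _ _ _ h2]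
    rw [pvStepB_head _ _ _ (by simp [List.mem_replicate])]
  by_cases h4 : card = "police"
  · subst h4
    simp only [String.reduceEq, reduceIte]
    rw [pvStepB_skip _ _ _ _ h1, pvStepB_skip _ _ _ _ h2, pvStepB_skip _ _ _ _ h3]
    rw [pvStepB_head _ _ _ (by simp [List.mem_replicate])]
  by_cases h5 : card = "ue"
  · subst h5
    simp only [String.reduceEq, reduceIte]
    rw [pvStepB_skip _ _ _ _ h1, pvStepB_skip _ _ _ _ h2, pvStepB_skip _ _ _ _ h3,
      pvStepB_skip _ _ _ _ h4]
    simpa using pvStepB_head "ue" e [] (by simp)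
  · rw [if_neg h1, if_neg h2, if_neg h3, if_neg h4, if_neg h5]
    exact pvStepB_none _ _ (by simp [List.mem_replicate, h1, h2, h3, h4, h5])

-- five pointwise equalities give equal decks
theorem pvDeck5_congr {a b c d e a' b' c' d' e' : Nat} (h1 : a = a') (h2 : b = b')
    (h3 : c = c') (h4 : d = d') (h5 : e = e') :
    pvDeck5 a b c d e = pvDeck5 a' b' c' d' e' := by subst h1 h2 h3 h4 h5; rfl

-- B's removal fold over any list, on a deck of this shape
theorem pvFoldB_deck5 (l : List String) (a b c d e : Nat) :
    l.foldl pvStepB (pvDeck5 a b c d e) =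
      pvDeck5 (a - l.count "russia") (b - l.count "protest") (c - l.count "media")
        (d - l.count "police") (e - l.count "ue") := by
  induction l generalizing a b c d e with
  | nil => simp
  | cons x t ih =>
      rw [List.foldl_cons, pvStepB_deck5, ih]
      simp only [List.count_cons, beq_iff_eq]
      refine pvDeck5_congr ?_ ?_ ?_ ?_ ?_ <;> (split_ifs with h <;> omega)

theorem add_to_deck_eq (known_cards player_cards : List String) :
    add_to_deck known_cards player_cards = add_to_deck_alt known_cards player_cards := by
  unfold add_to_deck add_to_deck_alt
  have hinit : ["russia", "protest", "media", "police", "ue"].foldl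
      (fun d name => d ++ [name, name, name]) [] = pvDeck5 3 3 3 3 3 := by rfl
  rw [hinit, List.foldl_append, pvFoldB_deck5, pvFoldB_deck5]
  simp only [pvFoldA_eq]
  have key : ∀ kc pc : Nat, ((3 : Int) - (kc : Int) - (pc : Int)).toNat = 3 - kc - pc := by
    intro kc pc; omega
  simp only [pvRangeFold, List.nil_append, key, pvDeck5, List.append_assoc]

-- ===== VERDICT (by name: the statement is the Claim_ definition above) =====
theorem add_to_deck_spec : Claim_equal_add_to_deck := by
  intro k p _
  exact add_to_deck_eq k p
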